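-- pv_equiv track=rewrite | github.com/ericuntzz/thefranchisorblueprint | scripts/anomaly-detection.py | render_anomaly_section
-- ===== SOURCE A (Python) =====
-- def render_anomaly_section(anomalies):
--     """Render anomalies as a markdown block for the daily email/synthesis."""
--     if not anomalies:
--         return "_No anomalies detected — today's metrics are within ±2σ of the 14-day baseline._"
--     if len(anomalies) == 1 and anomalies[0]["metric"] == "_baseline_insufficient":
--         return f"_{anomalies[0]['narrative']}_"
--
--     lines = []
--     extreme = [a for a in anomalies if a.get("severity") == "extreme"]
--     elevated = [a for a in anomalies if a.get("severity") == "elevated"]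
--     first_time = [a for a in anomalies if a.get("severity") == "first_time"]
--
--     if extreme:
--         lines.append("### 🔥 Extreme deviations (>3σ)")
--         for a in extreme:
--             lines.append(f"- {a['narrative']}")
--         lines.append("")
--     if first_time:
--         lines.append("### 🆕 First-time movement")
--         for a in first_time:
--             lines.append(f"- {a['narrative']}")
--         lines.append("")
--     if elevated:
--         lines.append("### ⚡ Elevated deviations (2–3σ)")
--         for a in elevated:
--             lines.append(f"- {a['narrative']}")
--         lines.append("")
--     return "\n".join(lines)
-- ===== SOURCE B (Python) =====
-- def render_anomaly_section(anomalies):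
--     """Render anomalies as a markdown block for the daily email/synthesis."""
--     if not anomalies:
--         return "_No anomalies detected — today's metrics are within ±2σ of the 14-day baseline._"
--     if len(anomalies) == 1 and anomalies[0]["metric"] == "_baseline_insufficient":
--         return f"_{anomalies[0]['narrative']}_"
--
--     buckets = {}
--     for a in anomalies:
--         s = a.get("severity")
--         if s in ("extreme", "first_time", "elevated"):
--             buckets.setdefault(s, []).append(a["narrative"])
--
--     out = []
--     for key, header in (("extreme", "### 🔥 Extreme deviations (>3σ)"),
--                         ("first_time", "### 🆕 First-time movement"),
--                         ("elevated", "### ⚡ Elevated deviations (2–3σ)")):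
--         narratives = buckets.get(key, [])
--         if narratives:
--             out.append(header)
--             out.extend("- " + n for n in narratives)
--             out.append("")
--     return "\n".join(out)
-- ===== Notes on version B (the rewrite author's own statement) =====
-- stated objective: alternative
-- what changed: Replaces A's three separate filter passes and three hard-coded if-blocks with a single bucketing pass over the anomalies into a severity-keyed dict, followed by one table-driven emission loop over ordered (severity, header) pairs.
import Mathlib
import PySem

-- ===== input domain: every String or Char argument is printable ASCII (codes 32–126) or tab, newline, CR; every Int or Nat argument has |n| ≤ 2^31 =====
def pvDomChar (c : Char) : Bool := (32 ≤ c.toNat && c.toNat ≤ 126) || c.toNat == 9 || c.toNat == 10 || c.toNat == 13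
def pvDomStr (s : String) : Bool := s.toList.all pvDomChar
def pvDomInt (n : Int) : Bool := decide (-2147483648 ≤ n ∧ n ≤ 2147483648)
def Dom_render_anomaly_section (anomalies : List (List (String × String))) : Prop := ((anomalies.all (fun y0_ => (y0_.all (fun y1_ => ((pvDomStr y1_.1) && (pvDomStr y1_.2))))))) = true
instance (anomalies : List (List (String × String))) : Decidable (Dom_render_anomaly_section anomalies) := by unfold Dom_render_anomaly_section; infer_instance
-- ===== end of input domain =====

-- B replaces A's three filter passes + three if-blocks by one bucketing pass into a
-- severity-keyed dict and a table-driven emission loop (alternative decomposition, same cost).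


-- shared helpers: each anomaly dict is an association list; lookups via PySem.Dict
-- a['narrative'] (raises KeyError when absent — excluded by Pre_; total form uses getD "")
def pvNarr (a : List (String × String)) : String :=
  ((PySem.Dict.mk a).get? "narrative").getD ""

def pvNoAnom : String := "_No anomalies detected — today's metrics are within ±2σ of the 14-day baseline._"

-- ===== PORT A =====
def render_anomaly_section (anomalies : List (List (String × String))) : String :=
  if anomalies = [] then
    pvNoAnom
  else if anomalies.length = 1 ∧ ((PySem.Dict.mk anomalies.headI).get? "metric").getD "" = "_baseline_insufficient" then
    "_" ++ pvNarr anomalies.headI ++ "_"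
  else
    let extreme := anomalies.filter (fun a => (PySem.Dict.mk a).get? "severity" == some "extreme")
    let elevated := anomalies.filter (fun a => (PySem.Dict.mk a).get? "severity" == some "elevated")
    let first_time := anomalies.filter (fun a => (PySem.Dict.mk a).get? "severity" == some "first_time")
    let lines : List String :=
      (if extreme ≠ [] then "### 🔥 Extreme deviations (>3σ)" :: extreme.map (fun a => "- " ++ pvNarr a) ++ [""] else []) ++
      (if first_time ≠ [] then "### 🆕 First-time movement" :: first_time.map (fun a => "- " ++ pvNarr a) ++ [""] else []) ++
      (if elevated ≠ [] then "### ⚡ Elevated deviations (2–3σ)" :: elevated.map (fun a => "- " ++ pvNarr a) ++ [""] else [])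
    PySem.Str.join "\n" lines

-- ===== PORT B =====
def render_anomaly_section_alt (anomalies : List (List (String × String))) : String :=
  if anomalies = [] then
    pvNoAnom
  else if anomalies.length = 1 ∧ ((PySem.Dict.mk anomalies.headI).get? "metric").getD "" = "_baseline_insufficient" then
    "_" ++ pvNarr anomalies.headI ++ "_"
  else
    let buckets : PySem.Dict String (List String) :=
      anomalies.foldl (fun d a =>
        match (PySem.Dict.mk a).get? "severity" with
        | some s =>
            if s = "extreme" ∨ s = "first_time" ∨ s = "elevated" then
              d.modify s [] (· ++ [pvNarr a])     -- buckets.setdefault(s, []).append(a['narrative'])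
            else d
        | none => d) PySem.Dict.empty
    let table : List (String × String) :=
      [("extreme", "### 🔥 Extreme deviations (>3σ)"),
       ("first_time", "### 🆕 First-time movement"),
       ("elevated", "### ⚡ Elevated deviations (2–3σ)")]
    let out := table.foldl (fun (acc : List String) kh =>
        let narratives := buckets.getD kh.1 []
        if narratives ≠ [] then acc ++ (kh.2 :: narratives.map (fun n => "- " ++ n) ++ [""]) else acc) []
    PySem.Str.join "\n" out

-- ===== PRECONDITION & SPEC =====
-- Pre_ excludes exactly the inputs on which the Python A raises KeyError: a single anomaly
-- whose dict lacks 'metric' (or, in the baseline case, 'narrative'), and any anomaly with a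
-- bucketed severity but no 'narrative' key. A returns normally on every other input.
def Pre_render_anomaly_section (anomalies : List (List (String × String))) : Prop :=
  (anomalies.length = 1 →
     ((PySem.Dict.mk anomalies.headI).get? "metric").isSome = true ∧
     ((PySem.Dict.mk anomalies.headI).get? "metric" = some "_baseline_insufficient" →
        ((PySem.Dict.mk anomalies.headI).get? "narrative").isSome = true)) ∧
  (∀ a ∈ anomalies,
     ((PySem.Dict.mk a).get? "severity" = some "extreme" ∨
      (PySem.Dict.mk a).get? "severity" = some "first_time" ∨
      (PySem.Dict.mk a).get? "severity" = some "elevated") →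
     ((PySem.Dict.mk a).get? "narrative").isSome = true)

instance (anomalies : List (List (String × String))) : Decidable (Pre_render_anomaly_section anomalies) := by
  unfold Pre_render_anomaly_section; infer_instance

def pvWitness_render_anomaly_section : (List (List (String × String))) :=
  [[("severity", "extreme"), ("narrative", "spend doubled")],
   [("severity", "elevated"), ("narrative", "ctr dipped")]]

def Spec_render_anomaly_section (anomalies : List (List (String × String))) (out : String) : Prop := out = render_anomaly_section_alt anomalies
instance (anomalies : List (List (String × String))) (out : String) : Decidable (Spec_render_anomaly_section anomalies out) := by unfold Spec_render_anomaly_section; infer_instance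

-- ===== CLAIM (what is proved, stated in full; the proofs are below) =====
def Claim_equal_render_anomaly_section : Prop := ∀ (anomalies : List (List (String × String))), Dom_render_anomaly_section anomalies → Pre_render_anomaly_section anomalies → Spec_render_anomaly_section anomalies (render_anomaly_section anomalies)

-- ===== LEMMAS AND PROOFS =====

-- the bucketing fold of B, named for the lemmas below
def pvStep (d : PySem.Dict String (List String)) (a : List (String × String)) : PySem.Dict String (List String) :=
  match (PySem.Dict.mk a).get? "severity" with
  | some s =>
      if s = "extreme" ∨ s = "first_time" ∨ s = "elevated" then
        d.modify s [] (· ++ [pvNarr a])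
      else d
  | none => d

-- B's bucket at a bucketed key k is A's filter, mapped to narratives
lemma pvBucket (k : String) (hk : k = "extreme" ∨ k = "first_time" ∨ k = "elevated")
    (l : List (List (String × String))) (d : PySem.Dict String (List String)) :
    (l.foldl pvStep d).getD k [] =
      d.getD k [] ++ (l.filter (fun a => (PySem.Dict.mk a).get? "severity" == some k)).map pvNarr := by
  induction l generalizing d with
  | nil => simp
  | cons a l ih =>
      simp only [List.foldl_cons, List.filter_cons]
      rcases hs : (PySem.Dict.mk a).get? "severity" with _ | s
      · simp [pvStep, hs, ih]
      · by_cases hsk : s = k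
        · subst hsk
          simp only [pvStep, hs, if_pos hk, ih, PySem.Dict.getD_modify,
            beq_self_eq_true, if_pos]
          simp [List.append_assoc]
        · by_cases hb : s = "extreme" ∨ s = "first_time" ∨ s = "elevated"
          · simp [pvStep, hs, hb, ih, PySem.Dict.getD_modify, Ne.symm hsk, hsk]
          · simp [pvStep, hs, hb, ih, hsk]

theorem render_anomaly_section_spec_aux (anomalies : List (List (String × String))) :
    render_anomaly_section anomalies = render_anomaly_section_alt anomalies := by
  unfold render_anomaly_section render_anomaly_section_alt
  by_cases h0 : anomalies = []
  · simp [h0]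
  · rw [if_neg h0, if_neg h0]
    by_cases h1 : anomalies.length = 1 ∧ ((PySem.Dict.mk anomalies.headI).get? "metric").getD "" = "_baseline_insufficient"
    · rw [if_pos h1, if_pos h1]
    · rw [if_neg h1, if_neg h1]
      have hb : ∀ k, k = "extreme" ∨ k = "first_time" ∨ k = "elevated" →
          (anomalies.foldl pvStep PySem.Dict.empty).getD k [] =
            (anomalies.filter (fun a => (PySem.Dict.mk a).get? "severity" == some k)).map pvNarr := by
        intro k hk
        simpa using pvBucket k hk anomalies PySem.Dict.empty
      simp only [List.foldl_cons, List.foldl_nil]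
      show PySem.Str.join "\n" _ = PySem.Str.join "\n" _
      congr 1
      rw [show (fun d a => match (PySem.Dict.mk a).get? "severity" with
            | some s => if s = "extreme" ∨ s = "first_time" ∨ s = "elevated" then
                PySem.Dict.modify d s [] (· ++ [pvNarr a]) else d
            | none => d) = pvStep from rfl]
      rw [hb "extreme" (Or.inl rfl), hb "first_time" (Or.inr (Or.inl rfl)),
          hb "elevated" (Or.inr (Or.inr rfl))]
      simp only [List.map_map, ne_eq, List.map_eq_nil_iff]
      by_cases he : anomalies.filter (fun a => (PySem.Dict.mk a).get? "severity" == some "extreme") = [] <;>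
      by_cases hf : anomalies.filter (fun a => (PySem.Dict.mk a).get? "severity" == some "first_time") = [] <;>
      by_cases hl : anomalies.filter (fun a => (PySem.Dict.mk a).get? "severity" == some "elevated") = [] <;>
        simp [he, hf, hl, Function.comp_def]

-- ===== VERDICT (by name: the statement is the Claim_ definition above) =====
theorem render_anomaly_section_spec : Claim_equal_render_anomaly_section := by
  intro anomalies _ _
  unfold Spec_render_anomaly_section
  exact render_anomaly_section_spec_aux anomalies
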